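-- pv_equiv track=rewrite | github.com/juliefolkerts/pp1 | 14-TestsRetake/p1.py | f
-- ===== SOURCE A (Python) =====
-- def f(n):
--     lst = list(str(n))
--     odds = []
--     for nr in lst:
--         if int(nr)%2 != 0:
--             odds.append(int(nr))
--     result = -1
--     if odds:
--         result = max(odds)-min(odds)
--     return result
-- ===== SOURCE B (Python) =====
-- def f(n):
--     # Presence table over the 10 possible digits, filled by arithmetic
--     # (divmod by 10) instead of string scanning; the answer is then read
--     # off the table by one pass over the odd digits 1,3,5,7,9 in order.
--     seen = [False] * 10
--     m = n
--     while True: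
--         seen[m % 10] = True
--         m //= 10
--         if m == 0:
--             break
--     lo = None
--     hi = None
--     for d in (1, 3, 5, 7, 9):
--         if seen[d]:
--             if lo is None:
--                 lo = d
--             hi = d
--     return -1 if lo is None else hi - lo
-- ===== Notes on version B (the rewrite author's own statement) =====
-- stated objective: alternative
-- what changed: B never looks at str(n): it extracts the digits arithmetically (repeated divmod by 10) into a 10-entry boolean presence table and then reads the answer off the table with one pass over the constant tuple (1,3,5,7,9), taking the first and last present entries; A builds an odds list from the characters of str(n) and reduces it twice with max() and min().
import Mathlib
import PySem

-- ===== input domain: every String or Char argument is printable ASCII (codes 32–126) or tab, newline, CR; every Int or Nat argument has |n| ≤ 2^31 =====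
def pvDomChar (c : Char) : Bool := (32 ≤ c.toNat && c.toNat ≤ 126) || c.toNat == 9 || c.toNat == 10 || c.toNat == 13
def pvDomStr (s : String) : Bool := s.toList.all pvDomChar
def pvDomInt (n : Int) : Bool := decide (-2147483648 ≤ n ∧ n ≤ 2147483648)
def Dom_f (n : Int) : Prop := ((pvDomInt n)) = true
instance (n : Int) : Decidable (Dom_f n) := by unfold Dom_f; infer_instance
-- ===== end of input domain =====

-- B drops the string entirely: digits are extracted arithmetically into a 10-entry boolean
-- presence table, and the answer is read off the table in one pass over (1,3,5,7,9)
-- (objective: alternative algorithm/data structure, same asymptotic cost).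

-- ===== PORT A =====
-- int(nr): PySem.Int.ofStr? returns none where Python raises ValueError (negative n,
-- excluded by Pre_f); the port keeps the accumulator unchanged there.
def f (n : Int) : Int :=
  let lst := (PySem.Int.toStr n).toList
  let odds := lst.foldl (fun acc c =>
    match PySem.Int.ofStr? (String.mk [c]) with
    | none => acc
    | some d => if d % 2 ≠ 0 then acc ++ [d] else acc) []
  if odds.isEmpty then (-1 : Int)
  else (PySem.List.max? odds (fun x => x)).getD 0 - (PySem.List.min? odds (fun x => x)).getD 0

-- ===== PORT B =====
-- the do-while digit loop of Source B: mark m % 10, m //= 10, stop when m == 0.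
-- Python's stop test 'm == 0' is ported as 'floordiv m 10 ≤ 0', identical for the
-- nonnegative n admitted by Pre_f (Python loops forever on negative n, which Pre_f
-- excludes); the '≤' form only makes the recursion total.
def markLoop (m : Int) (seen : List Bool) : List Bool :=
  let seen' := PySem.List.pySetD seen (PySem.Int.mod m 10) true
  if _h : PySem.Int.floordiv m 10 ≤ 0 then seen'
  else markLoop (PySem.Int.floordiv m 10) seen'
termination_by m.toNat
decreasing_by
  simp only [PySem.Int.floordiv_eq_ediv_of_pos (by norm_num : (0:Int) < 10)] at *
  omega

def f_alt (n : Int) : Int :=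
  let seen := markLoop n (List.replicate 10 false)
  let st := [(1:Int),3,5,7,9].foldl (fun (st : Option Int × Option Int) d =>
    if PySem.List.pyGetD seen d false = true then
      ((match st.1 with | none => some d | some lo => some lo), some d)
    else st) (none, none)
  match st.1, st.2 with
  | some lo, some hi => hi - lo
  | _, _ => -1

-- ===== PRECONDITION & SPEC =====
-- Pre_f excludes negative n: str(n) then contains '-', on which int('-') raises ValueError in A.
def Pre_f (n : Int) : Prop := 0 ≤ n
instance (n : Int) : Decidable (Pre_f n) := by unfold Pre_f; infer_instance
def pvWitness_f : Int := 13
def Spec_f (n : Int) (out : Int) : Prop := out = f_alt n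
instance (n : Int) (out : Int) : Decidable (Spec_f n out) := by unfold Spec_f; infer_instance

-- ===== CLAIM (what is proved, stated in full; the proofs are below) =====
def Claim_equal_f : Prop := ∀ (n : Int), Dom_f n → Pre_f n → Spec_f n (f n)

-- ===== LEMMAS AND PROOFS =====

-- Big-endian decimal digits of a natural number (the reference both ports are related to).
def digs (m : Nat) : List Nat :=
  if _h : m < 10 then [m] else digs (m / 10) ++ [m % 10]
termination_by m
decreasing_by omega

theorem digs_lt (m : Nat) : ∀ d ∈ digs m, d < 10 := by
  induction m using Nat.strong_induction_on with
  | _ m ih =>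
    rw [digs]
    split
    · intro d hd; simp at hd; omega
    · intro d hd
      simp only [List.mem_append, List.mem_singleton] at hd
      rcases hd with hd | hd
      · exact ih (m / 10) (by omega) d hd
      · omega

theorem toDigitsCore_eq (fuel : Nat) : ∀ (m : Nat) (l : List Char), m < fuel →
    Nat.toDigitsCore 10 fuel m l = (digs m).map Nat.digitChar ++ l := by
  induction fuel with
  | zero => omega
  | succ fuel ih =>
    intro m l hm
    rw [Nat.toDigitsCore, digs]
    by_cases h : m < 10
    · simp [Nat.div_eq_of_lt h, h, Nat.mod_eq_of_lt h]
    · have hne : ¬ m / 10 = 0 := by omega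
      simp only [hne, if_false, dif_neg h]
      rw [ih (m / 10) _ (by omega)]
      simp

theorem toDigits_eq (m : Nat) : Nat.toDigits 10 m = (digs m).map Nat.digitChar := by
  rw [Nat.toDigits, toDigitsCore_eq (m + 1) m [] (by omega), List.append_nil]

theorem ofStr_digitChar (d : Nat) (h : d < 10) :
    PySem.Int.ofStr? (String.mk [Nat.digitChar d]) = some (d : Int) := by
  interval_cases d <;> decide

-- A's accumulation loop over the digit characters is the filtered digit list.
theorem odds_fold_eq (ds : List Nat) (acc : List Int) (hlt : ∀ d ∈ ds, d < 10) :
    (ds.map Nat.digitChar).foldl (fun acc c =>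
      match PySem.Int.ofStr? (String.mk [c]) with
      | none => acc
      | some d => if d % 2 ≠ 0 then acc ++ [d] else acc) acc
    = acc ++ (ds.filter (fun d => d % 2 = 1)).map (fun (d : Nat) => (d : Int)) := by
  induction ds generalizing acc with
  | nil => simp
  | cons d t ihds =>
    have hd : d < 10 := hlt d (by simp)
    have ht : ∀ x ∈ t, x < 10 := fun x hx => hlt x (by simp [hx])
    simp only [List.map_cons, List.foldl_cons, ofStr_digitChar d hd, List.filter_cons]
    by_cases hodd : d % 2 = 1
    · rw [if_pos (by omega : ((d : Int) % 2 ≠ 0)), ihds _ ht]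
      simp [hodd]
    · rw [if_neg (by omega : ¬ ((d : Int) % 2 ≠ 0)), ihds _ ht]
      simp [hodd]

theorem markLoop_getD (m : Int) (seen : List Bool) :
    0 ≤ m → seen.length = 10 → ∀ i : Nat, i < 10 →
    (markLoop m seen).getD i false = (seen.getD i false || decide (i ∈ digs m.toNat)) := by
  induction m, seen using markLoop.induct with
  | case1 m seen h =>
    intro hm hlen i hi
    rw [markLoop]
    simp only [dif_pos h]
    rw [PySem.Int.floordiv_eq_ediv_of_pos (by norm_num : (0:Int) < 10)] at h
    have hmlt : m < 10 := by omega
    rw [PySem.Int.mod_eq_emod_of_pos (by norm_num),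
        PySem.List.pySetD_of_nonneg _ _ (by omega)]
    have hmod : (m % 10).toNat = m.toNat := by omega
    rw [hmod, digs, dif_pos (by omega : m.toNat < 10)]
    by_cases hcase : i = m.toNat
    · subst hcase
      have hlt : m.toNat < seen.length := by omega
      simp [List.getD_eq_getElem?_getD, hlt]
    · have hne : m.toNat ≠ i := fun hh => hcase hh.symm
      simp [List.getD_eq_getElem?_getD, hne, hcase]
  | case2 m seen seen' h ih =>
    intro hm hlen i hi
    rw [markLoop]
    simp only [dif_neg h]
    rw [PySem.Int.floordiv_eq_ediv_of_pos (by norm_num : (0:Int) < 10)] at h ih ⊢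
    have hge : 10 ≤ m := by omega
    have hlen' : (PySem.List.pySetD seen (PySem.Int.mod m 10) true).length = 10 := by
      rw [PySem.List.length_pySetD]; exact hlen
    rw [ih (by omega) hlen' i hi]
    simp only [seen']
    rw [PySem.Int.mod_eq_emod_of_pos (by norm_num),
        PySem.List.pySetD_of_nonneg _ _ (by omega)]
    have hdig : digs m.toNat = digs (m.toNat / 10) ++ [m.toNat % 10] := by
      rw [digs, dif_neg (by omega : ¬ m.toNat < 10)]
    have hq : (m / 10).toNat = m.toNat / 10 := by omega
    have hr : (m % 10).toNat = m.toNat % 10 := by omega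
    rw [hq, hr, hdig]
    by_cases hcase : i = m.toNat % 10
    · subst hcase
      have hlt : m.toNat % 10 < seen.length := by omega
      simp [List.getD_eq_getElem?_getD, hlt]
    · have hne : m.toNat % 10 ≠ i := fun hh => hcase hh.symm
      rw [show (seen.set (m.toNat % 10) true).getD i false = seen.getD i false by
        simp [List.getD_eq_getElem?_getD, hne]]
      congr 1
      simp [hcase]

-- the (lo, hi) scan over a constant list computes first/last filtered element
theorem scan_lohi (p : Int → Bool) (L : List Int) : ∀ (st : Option Int × Option Int),
    L.foldl (fun st d => if p d then
        ((match st.1 with | none => some d | some lo => some lo), some d)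
      else st) st
    = ((match st.1 with | none => (L.filter p).head? | some lo => some lo),
       (match (L.filter p).getLast? with | none => st.2 | some hi => some hi)) := by
  induction L with
  | nil => intro st; obtain ⟨a, b⟩ := st; cases a <;> rfl
  | cons c t ih =>
    intro st
    obtain ⟨a, b⟩ := st
    simp only [List.foldl_cons, List.filter_cons]
    by_cases hc : p c = true
    · simp only [hc, if_pos]
      rw [ih]
      cases hlast : (List.filter p t).getLast? with
      | none =>
        have ht : List.filter p t = [] := List.getLast?_eq_none_iff.mp hlast
        cases a <;> simp [ht]
      | some hi =>
        have ht : List.filter p t ≠ [] := by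
          intro hnil; rw [hnil] at hlast; simp at hlast
        obtain ⟨y, ys, hys⟩ := List.exists_cons_of_ne_nil ht
        rw [hys] at hlast
        have hcl : (c :: List.filter p t).getLast? = some hi := by
          rw [hys, List.getLast?_cons_cons]; exact hlast
        cases a <;> simp [hlast, hys]
    · simp only [hc, if_neg, Bool.false_eq_true, not_false_iff]
      rw [ih]

theorem pairwise_le_getLast (l : List Int) (hp : l.Pairwise (· < ·)) (x g : Int)
    (hx : x ∈ l) (hg : l.getLast? = some g) : x ≤ g := by
  induction l with
  | nil => simp at hx
  | cons a t ih =>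
    cases t with
    | nil =>
      simp at hx hg; omega
    | cons b t' =>
      rw [List.getLast?_cons_cons] at hg
      rcases List.mem_cons.mp hx with rfl | hx'
      · have hg_mem : g ∈ b :: t' := by
          have hne : (b :: t') ≠ [] := by simp
          rw [List.getLast?_eq_some_getLast hne] at hg
          have hmem := List.getLast_mem hne
          rwa [Option.some_inj.mp hg] at hmem
        exact le_of_lt ((List.pairwise_cons.mp hp).1 g hg_mem)
      · exact ih (List.pairwise_cons.mp hp).2 hx' hg

theorem pairwise_head_le (l : List Int) (hp : l.Pairwise (· < ·)) (x h0 : Int)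
    (hx : x ∈ l) (hh : l.head? = some h0) : h0 ≤ x := by
  cases l with
  | nil => simp at hx
  | cons a t =>
    simp only [List.head?_cons, Option.some_inj] at hh
    subst hh
    rcases List.mem_cons.mp hx with rfl | hx'
    · exact le_refl x
    · exact le_of_lt ((List.pairwise_cons.mp hp).1 x hx')

theorem mem_F_iff (m : Nat) (x : Int) :
    x ∈ ([1,3,5,7,9] : List Int).filter (fun d => decide (d.toNat ∈ digs m))
    ↔ x ∈ ((digs m).filter (fun d => d % 2 = 1)).map (fun (d : Nat) => (d : Int)) := by
  constructor
  · intro h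
    obtain ⟨hx5, hdm⟩ := List.mem_filter.mp h
    simp only [decide_eq_true_eq] at hdm
    fin_cases hx5 <;>
      exact List.mem_map.mpr ⟨_, List.mem_filter.mpr ⟨hdm, by decide⟩, by decide⟩
  · intro h
    obtain ⟨d, hdf, rfl⟩ := List.mem_map.mp h
    obtain ⟨hdm, hodd⟩ := List.mem_filter.mp hdf
    have hlt : d < 10 := digs_lt m d hdm
    simp only [decide_eq_true_eq] at hodd
    refine List.mem_filter.mpr ⟨?_, ?_⟩
    · interval_cases d <;> first | omega | decide
    · simp only [Int.toNat_natCast, decide_eq_true_eq]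
      exact hdm

-- ===== VERDICT (by name: the statement is the Claim_ definition above) =====
theorem f_spec : Claim_equal_f := by
  intro n _ hpre
  have hpre' : (0:Int) ≤ n := hpre
  unfold Spec_f f f_alt
  have hn0 : ¬ n < 0 := not_lt.mpr hpre'
  have htoc : (PySem.Int.toStr n).toList = (digs n.toNat).map Nat.digitChar := by
    rw [PySem.Int.toList_toStr, PySem.Int.toChars, if_neg hn0, toDigits_eq]
  simp only [htoc]
  rw [odds_fold_eq (digs n.toNat) [] (digs_lt n.toNat), List.nil_append]
  rw [scan_lohi (fun d => PySem.List.pyGetD (markLoop n (List.replicate 10 false)) d false)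
        [1,3,5,7,9] (none, none)]
  have hget : ∀ i : Nat, i < 10 →
      (markLoop n (List.replicate 10 false)).getD i false = decide (i ∈ digs n.toNat) := by
    intro i hi
    rw [markLoop_getD n (List.replicate 10 false) hpre' (by simp) i hi]
    have hrep : (List.replicate 10 false).getD i false = false := by
      rw [List.getD_eq_getElem?_getD, List.getElem?_replicate]
      simp [hi]
    rw [hrep]
    simp
  have hFeq : ([1,3,5,7,9] : List Int).filter
        (fun d => PySem.List.pyGetD (markLoop n (List.replicate 10 false)) d false)
      = ([1,3,5,7,9] : List Int).filter (fun d => decide (d.toNat ∈ digs n.toNat)) := by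
    refine List.filter_congr ?_
    intro x hx
    fin_cases hx <;>
      · rw [PySem.List.pyGetD_of_nonneg _ _ (by norm_num)]
        exact hget _ (by norm_num)
  rw [hFeq]
  set m : Nat := n.toNat with hm
  set F := ([1,3,5,7,9] : List Int).filter (fun d => decide (d.toNat ∈ digs m)) with hF
  set O := ((digs m).filter (fun d => d % 2 = 1)).map (fun (d : Nat) => (d : Int)) with hO
  have hmemiff : ∀ x : Int, x ∈ F ↔ x ∈ O := fun x => mem_F_iff m x
  by_cases hne : F = []
  · have hOnil : O = [] := List.eq_nil_iff_forall_not_mem.mpr (fun x hx => by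
      have hxF := (hmemiff x).mpr hx
      rw [hne] at hxF; simp at hxF)
    rw [hne, hOnil]
    simp
  · obtain ⟨a, hhd⟩ : ∃ a, F.head? = some a := by
      cases hh : F.head? with
      | none => exact absurd (List.head?_eq_none_iff.mp hh) hne
      | some a => exact ⟨a, rfl⟩
    have haF : a ∈ F := List.mem_of_mem_head? hhd
    have hFP : F.Pairwise (· < ·) := List.Pairwise.filter _ (by decide)
    have hOne : O ≠ [] := by
      intro h0
      have := (hmemiff a).mp haF
      rw [h0] at this; simp at this
    obtain ⟨M, hM⟩ : ∃ M, PySem.List.max? O (fun x => x) = some M := by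
      cases h : PySem.List.max? O (fun x => x) with
      | none => exact absurd ((PySem.List.max?_eq_none_iff O _).mp h) hOne
      | some M => exact ⟨M, rfl⟩
    obtain ⟨Mn, hMn⟩ : ∃ Mn, PySem.List.min? O (fun x => x) = some Mn := by
      cases h : PySem.List.min? O (fun x => x) with
      | none => exact absurd ((PySem.List.min?_eq_none_iff O _).mp h) hOne
      | some Mn => exact ⟨Mn, rfl⟩
    have hgl : F.getLast? = some (F.getLast hne) := List.getLast?_eq_some_getLast hne
    have hgF : F.getLast hne ∈ F := List.getLast_mem hne
    have hMg : M = F.getLast hne :=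
      le_antisymm
        (pairwise_le_getLast F hFP M (F.getLast hne) ((hmemiff M).mpr (PySem.List.max?_mem hM)) hgl)
        (PySem.List.max?_isMax hM (F.getLast hne) ((hmemiff (F.getLast hne)).mp hgF))
    have hMna : Mn = a :=
      le_antisymm
        (PySem.List.min?_isMin hMn a ((hmemiff a).mp haF))
        (pairwise_head_le F hFP Mn a ((hmemiff Mn).mpr (PySem.List.min?_mem hMn)) hhd)
    have hOemp : ¬ (O.isEmpty = true) := by
      simp only [List.isEmpty_iff]; exact hOne
    rw [if_neg hOemp, hM, hMn, Option.getD_some, Option.getD_some, hMg, hMna]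
    simp [hhd, hgl]
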